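-- pv_equiv track=rewrite | github.com/Aranchev/pytest_fundamental | src/_05_list_adv/mex/_05_dots.py | zipidi
-- ===== SOURCE A (Python) =====
-- def zipidi(a, b, c):
--     """Process and update the grid for multiple positions."""
--     e = []
--     f = []
--     d = list(zip(a, b))
--
--     for i in d:
--         for x in i[1]:
--             if x == 0:
--                 e.append([i[0][0] - 1, i[0][1]])  # Up
--             elif x == 1:
--                 e.append([i[0][0] + 1, i[0][1]])  # Down
--             elif x == 2:
--                 e.append([i[0][0], i[0][1] - 1])  # Left
--             elif x == 3:
--                 e.append([i[0][0], i[0][1] + 1])  # Right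
--
--     for i in e:
--         # Ensure valid indices and prevent duplicates
--         if (
--             i not in f
--             and 0 <= i[0] < len(c)
--             and 0 <= i[1] < len(c[0])
--             and c[i[0]][i[1]] == '.'
--         ):
--             f.append(i)
--             c[i[0]][i[1]] = 'x'  # Mark as visited
--
--     return f, c
-- ===== SOURCE B (Python) =====
-- def zipidi(a, b, c):
--     """Single fused pass: move each position by its direction codes and
--     immediately apply the validity/dedup/mark logic (mutates c like A)."""
--     offsets = {0: (-1, 0), 1: (1, 0), 2: (0, -1), 3: (0, 1)}
--     f = []
--     for pos, dirs in zip(a, b):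
--         for x in dirs:
--             if x in offsets:
--                 dr, dc = offsets[x]
--                 cell = [pos[0] + dr, pos[1] + dc]
--                 if (
--                     cell not in f
--                     and 0 <= cell[0] < len(c)
--                     and 0 <= cell[1] < len(c[0])
--                     and c[cell[0]][cell[1]] == '.'
--                 ):
--                     f.append(cell)
--                     c[cell[0]][cell[1]] = 'x'
--     return f, c
-- ===== Notes on version B (the rewrite author's own statement) =====
-- stated objective: alternative
-- what changed: Fused A's two phases (build the full candidate list e, then a second loop validating/deduping/marking) into a single nested pass over zip(a,b) that generates each candidate from an offset table and applies the validity/dedup/mark logic immediately, with no intermediate list.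
import Mathlib
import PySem

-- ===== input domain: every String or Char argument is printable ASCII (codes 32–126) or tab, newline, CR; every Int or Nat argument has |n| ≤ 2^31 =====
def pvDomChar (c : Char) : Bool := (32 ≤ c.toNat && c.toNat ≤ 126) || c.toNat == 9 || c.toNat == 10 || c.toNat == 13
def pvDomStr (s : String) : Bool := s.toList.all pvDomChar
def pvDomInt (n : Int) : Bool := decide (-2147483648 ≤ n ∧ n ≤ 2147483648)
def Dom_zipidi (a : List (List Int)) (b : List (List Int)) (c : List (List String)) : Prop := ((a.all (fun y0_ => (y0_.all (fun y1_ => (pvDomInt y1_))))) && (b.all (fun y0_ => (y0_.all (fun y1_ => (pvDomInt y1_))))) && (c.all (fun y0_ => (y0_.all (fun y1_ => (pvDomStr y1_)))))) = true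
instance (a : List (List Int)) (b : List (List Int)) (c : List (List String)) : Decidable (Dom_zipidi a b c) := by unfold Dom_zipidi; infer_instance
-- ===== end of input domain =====

-- B fuses A's two phases (candidate generation, then validate/dedup/mark) into one
-- pass driven by an offset table; equivalence is about the RETURN value (the Python A
-- and B both mutate c in place in the same way).

-- ===== PORT A =====
-- phase 2 body: the validate/dedup/mark step on state (f, c)
def zipidiStep (s : List (List Int) × List (List String)) (i : List Int) :
    List (List Int) × List (List String) :=
  let r := PySem.List.pyGetD i 0 0
  let cc := PySem.List.pyGetD i 1 0
  if i ∉ s.1 ∧ 0 ≤ r ∧ r < (s.2.length : Int) ∧ 0 ≤ cc ∧ cc < ((PySem.List.pyGetD s.2 0 []).length : Int) ∧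
      PySem.List.pyGetD (PySem.List.pyGetD s.2 r []) cc "" = "." then
    (s.1 ++ [i], s.2.set r.toNat ((PySem.List.pyGetD s.2 r []).set cc.toNat "x"))
  else s

def zipidi (a : List (List Int)) (b : List (List Int)) (c : List (List String)) : List (List Int) × List (List String) :=
  -- phase 1 builds the candidate list e; phase 2 folds the validate/mark step over it
  ((List.zip a b).foldl (fun e i =>
      i.2.foldl (fun e x =>
        if x = 0 then e ++ [[PySem.List.pyGetD i.1 0 0 - 1, PySem.List.pyGetD i.1 1 0]]
        else if x = 1 then e ++ [[PySem.List.pyGetD i.1 0 0 + 1, PySem.List.pyGetD i.1 1 0]]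
        else if x = 2 then e ++ [[PySem.List.pyGetD i.1 0 0, PySem.List.pyGetD i.1 1 0 - 1]]
        else if x = 3 then e ++ [[PySem.List.pyGetD i.1 0 0, PySem.List.pyGetD i.1 1 0 + 1]]
        else e) e) []).foldl zipidiStep ([], c)

-- ===== PORT B =====
def zipidiOffsets : PySem.Dict Int (Int × Int) :=
  PySem.Dict.ofList [(0, (-1, 0)), (1, (1, 0)), (2, (0, -1)), (3, (0, 1))]

def zipidi_alt (a : List (List Int)) (b : List (List Int)) (c : List (List String)) : List (List Int) × List (List String) :=
  (List.zip a b).foldl (fun s i =>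
    i.2.foldl (fun s x =>
      match zipidiOffsets.get? x with
      | some o =>
        let cell := [PySem.List.pyGetD i.1 0 0 + o.1, PySem.List.pyGetD i.1 1 0 + o.2]
        let r := PySem.List.pyGetD cell 0 0
        let cc := PySem.List.pyGetD cell 1 0
        if cell ∉ s.1 ∧ 0 ≤ r ∧ r < (s.2.length : Int) ∧ 0 ≤ cc ∧ cc < ((PySem.List.pyGetD s.2 0 []).length : Int) ∧
            PySem.List.pyGetD (PySem.List.pyGetD s.2 r []) cc "" = "." then
          (s.1 ++ [cell], s.2.set r.toNat ((PySem.List.pyGetD s.2 r []).set cc.toNat "x"))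
        else s
      | none => s) s) ([], c)

-- ===== PRECONDITION & SPEC =====
-- the candidate cell(s) one direction code contributes for position p (used by Pre_ and the proofs)
def zipidiCand1 (p : List Int) (x : Int) : List (List Int) :=
  if x = 0 then [[PySem.List.pyGetD p 0 0 - 1, PySem.List.pyGetD p 1 0]]
  else if x = 1 then [[PySem.List.pyGetD p 0 0 + 1, PySem.List.pyGetD p 1 0]]
  else if x = 2 then [[PySem.List.pyGetD p 0 0, PySem.List.pyGetD p 1 0 - 1]]
  else if x = 3 then [[PySem.List.pyGetD p 0 0, PySem.List.pyGetD p 1 0 + 1]]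
  else []

-- Pre_ excludes exactly the inputs on which the Python A raises IndexError:
-- a position with fewer than 2 coordinates paired with a valid direction code 0..3,
-- or a candidate move that passes A's bounds checks against len(c) and len(c[0]) but
-- indexes past the end of a shorter (ragged) row of c.
def Pre_zipidi (a : List (List Int)) (b : List (List Int)) (c : List (List String)) : Prop :=
  (∀ i ∈ List.zip a b, (∃ x ∈ i.2, x = (0 : Int) ∨ x = 1 ∨ x = 2 ∨ x = 3) → 2 ≤ i.1.length) ∧
  (∀ i ∈ List.zip a b, ∀ x ∈ i.2, ∀ cell ∈ zipidiCand1 i.1 x,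
    0 ≤ PySem.List.pyGetD cell 0 0 → PySem.List.pyGetD cell 0 0 < (c.length : Int) →
    0 ≤ PySem.List.pyGetD cell 1 0 → PySem.List.pyGetD cell 1 0 < ((c.headD []).length : Int) →
    PySem.List.pyGetD cell 1 0 < ((PySem.List.pyGetD c (PySem.List.pyGetD cell 0 0) []).length : Int))
instance (a : List (List Int)) (b : List (List Int)) (c : List (List String)) : Decidable (Pre_zipidi a b c) := by unfold Pre_zipidi; infer_instance

def pvWitness_zipidi : List (List Int) × List (List Int) × List (List String) :=
  ([[0, 0], [1, 1]], [[1, 3], [0]], [[".", "."], [".", "."]])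

def Spec_zipidi (a : List (List Int)) (b : List (List Int)) (c : List (List String)) (out : List (List Int) × List (List String)) : Prop := out = zipidi_alt a b c
instance (a : List (List Int)) (b : List (List Int)) (c : List (List String)) (out : List (List Int) × List (List String)) : Decidable (Spec_zipidi a b c out) := by unfold Spec_zipidi; infer_instance

-- ===== CLAIM (what is proved, stated in full; the proofs are below) =====
def Claim_equal_zipidi : Prop := ∀ (a : List (List Int)) (b : List (List Int)) (c : List (List String)), Dom_zipidi a b c → Pre_zipidi a b c → Spec_zipidi a b c (zipidi a b c)

-- ===== LEMMAS AND PROOFS =====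

lemma zipidi_phase1_eq (a b : List (List Int)) :
    ((List.zip a b).foldl (fun e i =>
      i.2.foldl (fun e x =>
        if x = 0 then e ++ [[PySem.List.pyGetD i.1 0 0 - 1, PySem.List.pyGetD i.1 1 0]]
        else if x = 1 then e ++ [[PySem.List.pyGetD i.1 0 0 + 1, PySem.List.pyGetD i.1 1 0]]
        else if x = 2 then e ++ [[PySem.List.pyGetD i.1 0 0, PySem.List.pyGetD i.1 1 0 - 1]]
        else if x = 3 then e ++ [[PySem.List.pyGetD i.1 0 0, PySem.List.pyGetD i.1 1 0 + 1]]
        else e) e) ([] : List (List Int)))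
    = (List.zip a b).flatMap (fun i => i.2.flatMap (zipidiCand1 i.1)) := by
  have hinner : ∀ (p : List Int) (ds : List Int) (e : List (List Int)),
      ds.foldl (fun e x =>
        if x = 0 then e ++ [[PySem.List.pyGetD p 0 0 - 1, PySem.List.pyGetD p 1 0]]
        else if x = 1 then e ++ [[PySem.List.pyGetD p 0 0 + 1, PySem.List.pyGetD p 1 0]]
        else if x = 2 then e ++ [[PySem.List.pyGetD p 0 0, PySem.List.pyGetD p 1 0 - 1]]
        else if x = 3 then e ++ [[PySem.List.pyGetD p 0 0, PySem.List.pyGetD p 1 0 + 1]]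
        else e) e = e ++ ds.flatMap (zipidiCand1 p) := by
    intro p ds e
    have : (fun (e : List (List Int)) (x : Int) =>
        if x = 0 then e ++ [[PySem.List.pyGetD p 0 0 - 1, PySem.List.pyGetD p 1 0]]
        else if x = 1 then e ++ [[PySem.List.pyGetD p 0 0 + 1, PySem.List.pyGetD p 1 0]]
        else if x = 2 then e ++ [[PySem.List.pyGetD p 0 0, PySem.List.pyGetD p 1 0 - 1]]
        else if x = 3 then e ++ [[PySem.List.pyGetD p 0 0, PySem.List.pyGetD p 1 0 + 1]]
        else e) = (fun e x => e ++ zipidiCand1 p x) := by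
      funext e x
      unfold zipidiCand1
      split_ifs <;> simp
    rw [this, PySem.List.foldl_append_eq_flatMap]
  have hfun : (fun (e : List (List Int)) (i : List Int × List Int) =>
      i.2.foldl (fun e x =>
        if x = 0 then e ++ [[PySem.List.pyGetD i.1 0 0 - 1, PySem.List.pyGetD i.1 1 0]]
        else if x = 1 then e ++ [[PySem.List.pyGetD i.1 0 0 + 1, PySem.List.pyGetD i.1 1 0]]
        else if x = 2 then e ++ [[PySem.List.pyGetD i.1 0 0, PySem.List.pyGetD i.1 1 0 - 1]]
        else if x = 3 then e ++ [[PySem.List.pyGetD i.1 0 0, PySem.List.pyGetD i.1 1 0 + 1]]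
        else e) e)
      = (fun e i => e ++ i.2.flatMap (zipidiCand1 i.1)) := by
    funext e i; exact hinner i.1 i.2 e
  rw [hfun, PySem.List.foldl_append_eq_flatMap]
  simp

lemma zipidiOffsets_get (x : Int) :
    zipidiOffsets.get? x =
      if x = 0 then some ((-1 : Int), (0 : Int))
      else if x = 1 then some (1, 0)
      else if x = 2 then some (0, -1)
      else if x = 3 then some (0, 1) else none := by
  have hd : zipidiOffsets = PySem.Dict.mk [(0, (-1, 0)), (1, (1, 0)), (2, (0, -1)), (3, (0, 1))] := by decide
  rw [hd]
  by_cases h0 : x = 0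
  · subst h0; rfl
  by_cases h1 : x = 1
  · subst h1; rfl
  by_cases h2 : x = 2
  · subst h2; rfl
  by_cases h3 : x = 3
  · subst h3; rfl
  simp [PySem.Dict.get?, h0, h1, h2, h3,
    Ne.symm h0, Ne.symm h1, Ne.symm h2, Ne.symm h3]

-- B's inner body equals folding A's phase-2 step over the candidate(s) of one code
lemma zipidi_inner_eq (p : List Int) (x : Int) (s : List (List Int) × List (List String)) :
    (match zipidiOffsets.get? x with
      | some o =>
        let cell := [PySem.List.pyGetD p 0 0 + o.1, PySem.List.pyGetD p 1 0 + o.2]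
        let r := PySem.List.pyGetD cell 0 0
        let cc := PySem.List.pyGetD cell 1 0
        if cell ∉ s.1 ∧ 0 ≤ r ∧ r < (s.2.length : Int) ∧ 0 ≤ cc ∧ cc < ((PySem.List.pyGetD s.2 0 []).length : Int) ∧
            PySem.List.pyGetD (PySem.List.pyGetD s.2 r []) cc "" = "." then
          (s.1 ++ [cell], s.2.set r.toNat ((PySem.List.pyGetD s.2 r []).set cc.toNat "x"))
        else s
      | none => s)
    = (zipidiCand1 p x).foldl zipidiStep s := by
  rw [zipidiOffsets_get]
  unfold zipidiCand1
  by_cases h0 : x = 0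
  · subst h0
    show zipidiStep s [PySem.List.pyGetD p 0 0 + -1, PySem.List.pyGetD p 1 0 + 0] =
      List.foldl zipidiStep s [[PySem.List.pyGetD p 0 0 - 1, PySem.List.pyGetD p 1 0]]
    rw [show PySem.List.pyGetD p 0 0 + (-1 : Int) = PySem.List.pyGetD p 0 0 - 1 from by ring,
        show PySem.List.pyGetD p 1 0 + (0 : Int) = PySem.List.pyGetD p 1 0 from by ring]
    rfl
  by_cases h1 : x = 1
  · subst h1
    show zipidiStep s [PySem.List.pyGetD p 0 0 + 1, PySem.List.pyGetD p 1 0 + 0] =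
      List.foldl zipidiStep s [[PySem.List.pyGetD p 0 0 + 1, PySem.List.pyGetD p 1 0]]
    rw [show PySem.List.pyGetD p 1 0 + (0 : Int) = PySem.List.pyGetD p 1 0 from by ring]
    rfl
  by_cases h2 : x = 2
  · subst h2
    show zipidiStep s [PySem.List.pyGetD p 0 0 + 0, PySem.List.pyGetD p 1 0 + -1] =
      List.foldl zipidiStep s [[PySem.List.pyGetD p 0 0, PySem.List.pyGetD p 1 0 - 1]]
    rw [show PySem.List.pyGetD p 0 0 + (0 : Int) = PySem.List.pyGetD p 0 0 from by ring,
        show PySem.List.pyGetD p 1 0 + (-1 : Int) = PySem.List.pyGetD p 1 0 - 1 from by ring]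
    rfl
  by_cases h3 : x = 3
  · subst h3
    show zipidiStep s [PySem.List.pyGetD p 0 0 + 0, PySem.List.pyGetD p 1 0 + 1] =
      List.foldl zipidiStep s [[PySem.List.pyGetD p 0 0, PySem.List.pyGetD p 1 0 + 1]]
    rw [show PySem.List.pyGetD p 0 0 + (0 : Int) = PySem.List.pyGetD p 0 0 from by ring]
    rfl
  simp [h0, h1, h2, h3]

lemma foldl_step_flatMap {α : Type} (g : α → List (List Int)) :
    ∀ (l : List α) (s : List (List Int) × List (List String)),
      (l.flatMap g).foldl zipidiStep s = l.foldl (fun s d => (g d).foldl zipidiStep s) s := by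
  intro l
  induction l with
  | nil => intro s; rfl
  | cons d t ih => intro s; simp only [List.flatMap_cons, List.foldl_append, List.foldl_cons]; exact ih _

-- ===== VERDICT (by name: the statement is the Claim_ definition above) =====
theorem zipidi_spec : Claim_equal_zipidi := by
  intro a b c _ _
  show zipidi a b c = zipidi_alt a b c
  unfold zipidi zipidi_alt
  rw [zipidi_phase1_eq, foldl_step_flatMap]
  apply PySem.List.foldl_congr_mem
  intro s i _
  rw [foldl_step_flatMap]
  apply PySem.List.foldl_congr_mem
  intro s x _
  exact (zipidi_inner_eq i.1 x s).symm
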